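-- pv_equiv track=rewrite | github.com/jesalasc/universal-dependencies-centrality | asg_cen/partition_tools.py | get_not_null_partitions
-- ===== SOURCE A (Python) =====
-- def get_not_null_partitions(list_collection):
--     yield (list_collection[0],)
--     if len(list_collection) == 1:
--         return
--     for p in get_not_null_partitions(list_collection[1:]):
--         if all((list_collection[0] & e == 0 for e in p)):
--             yield (list_collection[0], *p)
--         yield p
-- ===== SOURCE B (Python) =====
-- def get_not_null_partitions(list_collection):
--     # Iterative bottom-up build: process elements from the last one backwards,
--     # maintaining the full list of partition tuples of the suffix seen so far.
--     cur = [(list_collection[-1],)]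
--     for e in reversed(list_collection[:-1]):
--         new = [(e,)]
--         for p in cur:
--             if all(e & x == 0 for x in p):
--                 new.append((e,) + p)
--             new.append(p)
--         cur = new
--     yield from cur
-- ===== Notes on version B (the rewrite author's own statement) =====
-- stated objective: alternative
-- what changed: Replaces A's head-first recursive generator by an iterative bottom-up pass: starting from the last element it maintains the explicit list of partition tuples of the suffix processed so far, extending it for each earlier element, and finally yields that list.
import Mathlib
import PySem

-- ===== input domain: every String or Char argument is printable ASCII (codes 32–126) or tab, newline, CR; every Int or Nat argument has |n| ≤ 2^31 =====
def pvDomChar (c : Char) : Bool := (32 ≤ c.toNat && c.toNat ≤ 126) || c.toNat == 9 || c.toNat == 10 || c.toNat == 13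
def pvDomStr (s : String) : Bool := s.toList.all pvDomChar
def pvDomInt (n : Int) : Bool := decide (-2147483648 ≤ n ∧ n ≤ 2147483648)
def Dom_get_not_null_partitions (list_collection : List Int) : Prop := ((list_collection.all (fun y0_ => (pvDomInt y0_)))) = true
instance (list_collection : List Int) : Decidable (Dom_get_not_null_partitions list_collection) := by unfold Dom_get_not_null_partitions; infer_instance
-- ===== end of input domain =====

-- B replaces A's recursive generator by an iterative bottom-up pass over the reversed
-- prefix, maintaining the suffix's partition list explicitly; objective: alternative.

-- ===== PORT A =====
-- A is a generator; its port is the list of all yielded tuples (full consumption).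
def get_not_null_partitions : List Int → List (List Int)
  | [] => []  -- list_collection[0] raises IndexError here; excluded by Pre_
  | x :: rest =>
    [x] :: (if rest.length = 0 then []
            else (get_not_null_partitions rest).flatMap
              (fun p => (if p.all (fun e => PySem.Int.band x e == 0) then [x :: p] else []) ++ [p]))

-- ===== PORT B =====
-- the inner `for p in cur` loop with its two appends
def pvStep (e : Int) (cur : List (List Int)) : List (List Int) :=
  cur.foldl (fun new p =>
    (new ++ (if p.all (fun x0 => PySem.Int.band e x0 == 0) then [e :: p] else [])) ++ [p])
    [[e]]

def get_not_null_partitions_alt (list_collection : List Int) : List (List Int) :=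
  match PySem.List.pyGet? list_collection (-1) with
  | none => []  -- list_collection[-1] raises IndexError (empty list); excluded by Pre_
  | some last =>
    ((PySem.List.slice list_collection none (some (-1))).reverse).foldl
      (fun cur e => pvStep e cur) [[last]]

-- ===== PRECONDITION & SPEC =====
-- On [] the Python A raises IndexError at the first yield; Pre_ excludes exactly that.
def Pre_get_not_null_partitions (list_collection : List Int) : Prop :=
  list_collection ≠ []
instance (list_collection : List Int) : Decidable (Pre_get_not_null_partitions list_collection) := by
  unfold Pre_get_not_null_partitions; infer_instance

def pvWitness_get_not_null_partitions : List Int := [1, 2, 3]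

def Spec_get_not_null_partitions (list_collection : List Int) (out : List (List Int)) : Prop :=
  out = get_not_null_partitions_alt list_collection
instance (list_collection : List Int) (out : List (List Int)) : Decidable (Spec_get_not_null_partitions list_collection out) := by
  unfold Spec_get_not_null_partitions; infer_instance

-- ===== CLAIM (what is proved, stated in full; the proofs are below) =====
def Claim_equal_get_not_null_partitions : Prop := ∀ (list_collection : List Int), Dom_get_not_null_partitions list_collection → Pre_get_not_null_partitions list_collection → Spec_get_not_null_partitions list_collection (get_not_null_partitions list_collection)

-- ===== LEMMAS AND PROOFS =====

theorem foldl_acc_append {α β : Type} (l : List α) (f : α → List β) :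
    ∀ init : List β, l.foldl (fun acc x => acc ++ f x) init = init ++ l.flatMap f := by
  induction l with
  | nil => intro init; simp
  | cons a l ih => intro init; simp [ih, List.append_assoc]

theorem pvStep_eq (e : Int) (cur : List (List Int)) :
    pvStep e cur
      = [e] :: cur.flatMap
          (fun p => (if p.all (fun x0 => PySem.Int.band e x0 == 0) then [e :: p] else []) ++ [p]) := by
  unfold pvStep
  have hb : (fun (new : List (List Int)) (p : List Int) =>
        (new ++ (if p.all (fun x0 => PySem.Int.band e x0 == 0) then [e :: p] else [])) ++ [p])
      = (fun new p =>
        new ++ ((if p.all (fun x0 => PySem.Int.band e x0 == 0) then [e :: p] else []) ++ [p])) := by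
    funext new p; rw [List.append_assoc]
  rw [hb, foldl_acc_append]
  rfl

theorem gnp_cons (x : Int) (xs : List Int) :
    get_not_null_partitions (x :: xs)
      = [x] :: (get_not_null_partitions xs).flatMap
          (fun p => (if p.all (fun e => PySem.Int.band x e == 0) then [x :: p] else []) ++ [p]) := by
  cases xs with
  | nil => rfl
  | cons y ys => simp [get_not_null_partitions]

theorem alt_singleton (x : Int) : get_not_null_partitions_alt [x] = [[x]] := by
  rfl

theorem alt_cons_cons (x y : Int) (ys : List Int) :
    get_not_null_partitions_alt (x :: y :: ys)
      = pvStep x (get_not_null_partitions_alt (y :: ys)) := by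
  unfold get_not_null_partitions_alt
  rw [PySem.List.pyGet?_neg_one, PySem.List.pyGet?_neg_one, List.getLast?_cons_cons]
  cases hl : (y :: ys).getLast? with
  | none => simp at hl
  | some last =>
    have hs1 := PySem.List.slice_to_neg_natCast (xs := x :: y :: ys) (k := 1) (by omega)
    have hs2 := PySem.List.slice_to_neg_natCast (xs := y :: ys) (k := 1) (by omega)
    norm_num at hs1 hs2
    rw [hs1, hs2]
    simp [List.foldl_append]

theorem gnp_eq_alt (xs : List Int) (h : xs ≠ []) :
    get_not_null_partitions xs = get_not_null_partitions_alt xs := by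
  induction xs with
  | nil => exact absurd rfl h
  | cons x xs ih =>
    cases xs with
    | nil =>
      rw [alt_singleton]; rfl
    | cons y ys =>
      rw [gnp_cons, alt_cons_cons, pvStep_eq, ih (by simp)]

-- ===== VERDICT (by name: the statement is the Claim_ definition above) =====
theorem get_not_null_partitions_spec : Claim_equal_get_not_null_partitions := by
  intro xs _ hpre
  exact gnp_eq_alt xs hpre
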